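-- pv_equiv track=rewrite | github.com/JackSSK/CherSNP | pattern.py | _getSites
-- ===== SOURCE A (Python) =====
-- def _getSites(start, end, set):
--     set = sorted(set, key=lambda x: x[0])
--     answer = []
--     for ele in set:
--         if start < ele[0] < end:
--             answer.append(ele)
--         elif ele[0] >= end: break
--     return answer
-- ===== SOURCE B (Python) =====
-- def _getSites(start, end, set):
--     s = sorted(set, key=lambda x: x[0])
--     n = len(s)
--     # low = first index with key > start (binary search)
--     lo, hi = 0, n
--     while lo < hi:
--         mid = (lo + hi) // 2
--         if s[mid][0] <= start:
--             lo = mid + 1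
--         else:
--             hi = mid
--     low = lo
--     # high = first index >= low with key >= end (binary search)
--     lo, hi = low, n
--     while lo < hi:
--         mid = (lo + hi) // 2
--         if s[mid][0] < end:
--             lo = mid + 1
--         else:
--             hi = mid
--     return s[low:lo]
-- ===== Notes on version B (the rewrite author's own statement) =====
-- stated objective: alternative
-- what changed: After sorting, B locates the (start,end) window with two hand-written binary searches and returns one slice, instead of A's linear scan with an early break; the O(n log n) sort dominates both, so no speed claim.
import Mathlib
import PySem

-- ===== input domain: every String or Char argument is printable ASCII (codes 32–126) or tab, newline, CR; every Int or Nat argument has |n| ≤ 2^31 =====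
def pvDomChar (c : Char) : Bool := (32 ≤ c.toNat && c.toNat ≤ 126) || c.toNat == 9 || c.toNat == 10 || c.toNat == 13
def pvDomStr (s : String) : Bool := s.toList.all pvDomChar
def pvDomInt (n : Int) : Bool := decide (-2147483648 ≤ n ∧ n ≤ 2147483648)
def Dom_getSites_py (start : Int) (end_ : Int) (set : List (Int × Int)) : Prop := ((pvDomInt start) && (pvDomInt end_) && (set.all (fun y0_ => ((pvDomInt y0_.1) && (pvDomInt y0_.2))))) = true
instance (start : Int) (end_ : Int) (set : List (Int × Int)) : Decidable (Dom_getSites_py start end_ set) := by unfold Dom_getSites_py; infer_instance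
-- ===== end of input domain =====

-- B replaces A's linear scan (with early break) over the sorted list by two binary
-- searches for the window boundaries and a single slice; same O(n log n) sort dominates both.

-- ===== PORT A =====
-- the for-loop with append/break over the sorted list
def getSitesLoop (start end_ : Int) : List (Int × Int) → List (Int × Int)
  | [] => []
  | ele :: rest =>
    if start < ele.1 ∧ ele.1 < end_ then ele :: getSitesLoop start end_ rest
    else if ele.1 ≥ end_ then [] else getSitesLoop start end_ rest

def getSites_py (start : Int) (end_ : Int) (set : List (Int × Int)) : List (Int × Int) :=
  getSitesLoop start end_ (PySem.List.sorted set (fun x => x.1))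

-- ===== PORT B =====
-- Source B's while-loop binary search: first index in [lo,hi) whose key fails p
def bsearch (s : List (Int × Int)) (p : Int → Bool) (lo hi : Nat) : Nat :=
  if _h : lo < hi then
    let mid := (lo + hi) / 2
    if p (s.getD mid (0, 0)).1 then bsearch s p (mid + 1) hi else bsearch s p lo mid
  else lo
termination_by hi - lo
decreasing_by all_goals omega

def getSites_py_alt (start : Int) (end_ : Int) (set : List (Int × Int)) : List (Int × Int) :=
  let s := PySem.List.sorted set (fun x => x.1)
  let n := s.length
  let low := bsearch s (fun k => decide (k ≤ start)) 0 n
  let high := bsearch s (fun k => decide (k < end_)) low n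
  PySem.List.slice s (some (low : Int)) (some (high : Int))

-- ===== PRECONDITION & SPEC =====
def Spec_getSites_py (start : Int) (end_ : Int) (set : List (Int × Int)) (out : List (Int × Int)) : Prop := out = getSites_py_alt start end_ set
instance (start : Int) (end_ : Int) (set : List (Int × Int)) (out : List (Int × Int)) : Decidable (Spec_getSites_py start end_ set out) := by unfold Spec_getSites_py; infer_instance

-- ===== CLAIM (what is proved, stated in full; the proofs are below) =====
def Claim_equal_getSites_py : Prop := ∀ (start : Int) (end_ : Int) (set : List (Int × Int)), Dom_getSites_py start end_ set → Spec_getSites_py start end_ set (getSites_py start end_ set)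

-- ===== LEMMAS AND PROOFS =====

-- A's loop on a key-sorted list is the filter of the strict window.
theorem getSitesLoop_eq_filter (start end_ : Int) (s : List (Int × Int))
    (hs : s.Pairwise (fun a b => a.1 ≤ b.1)) :
    getSitesLoop start end_ s = s.filter (fun e => decide (start < e.1 ∧ e.1 < end_)) := by
  induction s with
  | nil => rfl
  | cons e rest ih =>
    rcases List.pairwise_cons.mp hs with ⟨hhead, htail⟩
    by_cases h1 : start < e.1 ∧ e.1 < end_
    · simp [getSitesLoop, h1, ih htail]
    · by_cases h2 : e.1 ≥ end_
      · simp only [getSitesLoop, if_neg h1, if_pos h2]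
        symm
        refine List.filter_eq_nil_iff.mpr ?_
        intro x hx
        simp only [decide_eq_true_eq, not_and]
        rcases List.mem_cons.mp hx with rfl | hx'
        · omega
        · have := hhead x hx'
          omega
      · simp only [getSitesLoop, if_neg h1, if_neg h2, List.filter_cons]
        have : ¬ (start < e.1 ∧ e.1 < end_) := by omega
        simp [this, ih htail]

-- binary-search characterisation on an index-monotone predicate
theorem bsearch_spec (s : List (Int × Int)) (p : Int → Bool)
    (hmono : ∀ i j (hi : i < s.length) (hj : j < s.length), i ≤ j →
      p (s[j]).1 = true → p (s[i]).1 = true) :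
    ∀ d lo hi, hi - lo ≤ d → lo ≤ hi → hi ≤ s.length →
      lo ≤ bsearch s p lo hi ∧ bsearch s p lo hi ≤ hi ∧
      (∀ i (h : i < s.length), lo ≤ i → i < bsearch s p lo hi → p (s[i]).1 = true) ∧
      (∀ i (h : i < s.length), bsearch s p lo hi ≤ i → i < hi → p (s[i]).1 = false) := by
  intro d
  induction d with
  | zero =>
    intro lo hi hd hlh _
    have : ¬ lo < hi := by omega
    rw [bsearch, dif_neg this]
    exact ⟨le_refl _, by omega, fun i h h1 h2 => absurd (lt_of_le_of_lt h1 h2) (by omega),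
           fun i h h1 h2 => absurd (lt_of_le_of_lt h1 h2) (by omega)⟩
  | succ d ih =>
    intro lo hi hd hlh hhn
    by_cases h : lo < hi
    · have hmidlt : (lo + hi) / 2 < hi := by omega
      have hmidge : lo ≤ (lo + hi) / 2 := by omega
      have hmidlen : (lo + hi) / 2 < s.length := lt_of_lt_of_le hmidlt hhn
      have hget : s.getD ((lo + hi) / 2) (0, 0) = s[(lo + hi) / 2] :=
        List.getD_eq_getElem s (0, 0) hmidlen
      rw [bsearch, dif_pos h]
      simp only [hget]
      by_cases hp : p (s[(lo + hi) / 2]).1 = true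
      · rw [if_pos hp]
        obtain ⟨c1, c2, c3, c4⟩ := ih ((lo + hi) / 2 + 1) hi (by omega) (by omega) hhn
        refine ⟨by omega, c2, ?_, c4⟩
        intro i hil h1 h2
        by_cases hc : (lo + hi) / 2 + 1 ≤ i
        · exact c3 i hil hc h2
        · exact hmono i ((lo + hi) / 2) hil hmidlen (by omega) hp
      · rw [if_neg hp]
        obtain ⟨c1, c2, c3, c4⟩ := ih lo ((lo + hi) / 2) (by omega) (by omega) (by omega)
        refine ⟨c1, by omega, c3, ?_⟩
        intro i hil h1 h2
        by_cases hc : i < (lo + hi) / 2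
        · exact c4 i hil h1 hc
        · exact eq_false_of_ne_true (fun hpt =>
            (absurd (hmono ((lo + hi) / 2) i hmidlen hil (by omega) hpt)
              (by simpa using hp)))
    · rw [bsearch, dif_neg h]
      exact ⟨le_refl _, by omega, fun i hil h1 h2 => absurd (lt_of_le_of_lt h1 h2) (Nat.lt_irrefl lo),
             fun i hil h1 h2 => absurd (lt_of_le_of_lt h1 h2) h⟩

-- the slice between the two boundaries is the filter of the strict window
theorem slice_eq_filter (start end_ : Int) (s : List (Int × Int))
    (low high : Nat) (hlh : low ≤ high) (hhn : high ≤ s.length)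
    (h1 : ∀ i (h : i < s.length), i < low → (s[i]).1 ≤ start)
    (h2 : ∀ i (h : i < s.length), low ≤ i → i < high → start < (s[i]).1 ∧ (s[i]).1 < end_)
    (h3 : ∀ i (h : i < s.length), high ≤ i → ¬ (s[i]).1 < end_) :
    (s.drop low).take (high - low) = s.filter (fun e => decide (start < e.1 ∧ e.1 < end_)) := by
  have hdecomp : s = s.take low ++ (s.drop low).take (high - low) ++ s.drop high := by
    have h4 : s.take high = s.take low ++ (s.drop low).take (high - low) := by
      conv_lhs => rw [show high = low + (high - low) by omega]
      exact List.take_add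
    rw [← h4, List.take_append_drop]
  conv_rhs => rw [hdecomp]
  rw [List.filter_append, List.filter_append]
  have hA : (s.take low).filter (fun e => decide (start < e.1 ∧ e.1 < end_)) = [] := by
    refine List.filter_eq_nil_iff.mpr ?_
    intro x hx
    obtain ⟨i, hi, hxe⟩ := List.mem_iff_getElem.mp hx
    have hilow : i < low := by
      have := List.length_take_le low s
      have := hi; simp [List.length_take] at this; omega
    have hig : (s.take low)[i] = s[i]'(by simp [List.length_take] at hi; omega) := by
      simp
    rw [hig] at hxe
    have := h1 i (by simp [List.length_take] at hi; omega) hilow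
    subst hxe
    simp only [decide_eq_true_eq]
    omega
  have hB : ((s.drop low).take (high - low)).filter (fun e => decide (start < e.1 ∧ e.1 < end_)) = (s.drop low).take (high - low) := by
    refine List.filter_eq_self.mpr ?_
    intro x hx
    obtain ⟨i, hi, hxe⟩ := List.mem_iff_getElem.mp hx
    have hilen : i < high - low := by simp [List.length_take, List.length_drop] at hi; omega
    have hidlen : low + i < s.length := by omega
    have hig : ((s.drop low).take (high - low))[i] = s[low + i]'hidlen := by
      simp [List.getElem_take, List.getElem_drop]
    rw [hig] at hxe
    have := h2 (low + i) hidlen (by omega) (by omega)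
    subst hxe
    simpa using this
  have hC : (s.drop high).filter (fun e => decide (start < e.1 ∧ e.1 < end_)) = [] := by
    refine List.filter_eq_nil_iff.mpr ?_
    intro x hx
    obtain ⟨i, hi, hxe⟩ := List.mem_iff_getElem.mp hx
    have hidlen : high + i < s.length := by simp [List.length_drop] at hi; omega
    have hig : (s.drop high)[i] = s[high + i]'hidlen := by simp [List.getElem_drop]
    rw [hig] at hxe
    have := h3 (high + i) hidlen (by omega)
    subst hxe
    simp only [decide_eq_true_eq]
    omega
  rw [hA, hB, hC, List.nil_append, List.append_nil]

-- ===== VERDICT (by name: the statement is the Claim_ definition above) =====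
theorem getSites_py_spec : Claim_equal_getSites_py := by
  intro start end_ set _
  unfold Spec_getSites_py getSites_py getSites_py_alt
  set s := PySem.List.sorted set (fun x : Int × Int => x.1) with hs
  have hpw : s.Pairwise (fun a b => a.1 ≤ b.1) := by
    simpa using PySem.List.sorted_pairwise set (fun x : Int × Int => x.1)
  have hmono : ∀ i j (hi : i < s.length) (hj : j < s.length), i ≤ j → (s[i]).1 ≤ (s[j]).1 := by
    intro i j hi hj hij
    rcases Nat.lt_or_ge i j with hlt | hge
    · exact List.pairwise_iff_getElem.mp hpw i j hi hj hlt
    · have : i = j := by omega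
      subst this; exact le_refl _
  set low := bsearch s (fun k => decide (k ≤ start)) 0 s.length with hlow
  obtain ⟨l1, l2, l3, l4⟩ := bsearch_spec s (fun k => decide (k ≤ start))
    (fun i j hi hj hij hp => by
      simp only [decide_eq_true_eq] at *
      exact le_trans (hmono i j hi hj hij) hp)
    s.length 0 s.length (by omega) (by omega) (le_refl _)
  set high := bsearch s (fun k => decide (k < end_)) low s.length with hhigh
  obtain ⟨g1, g2, g3, g4⟩ := bsearch_spec s (fun k => decide (k < end_))
    (fun i j hi hj hij hp => by
      simp only [decide_eq_true_eq] at *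
      exact lt_of_le_of_lt (hmono i j hi hj hij) hp)
    s.length low s.length (by omega) l2 (le_refl _)
  rw [getSitesLoop_eq_filter start end_ s hpw]
  rw [PySem.List.slice_natCast]
  refine (slice_eq_filter start end_ s low high g1 g2 ?_ ?_ ?_).symm
  · intro i h hil
    have := l3 i h (by omega) hil
    simpa using this
  · intro i h hli hih
    constructor
    · have := l4 i h hli (by omega)
      simp only [decide_eq_false_iff_not] at this
      omega
    · have := g3 i h hli hih
      simpa using this
  · intro i h hih
    have := g4 i h hih h
    simpa using this
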